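-- pv_equiv track=rewrite | github.com/fefranco97/IST-105-Assignment7 | bitwise_operations.py | bitwise_operations
-- ===== SOURCE A (Python) =====
-- def bitwise_operations(numbers):
--     if not numbers:
--         return 0, 0, 0
--
--     bitwise_and = numbers[0]
--     bitwise_or = numbers[0]
--     bitwise_xor = numbers[0]
--
--     for num in numbers[1:]:
--         bitwise_and &= num
--         bitwise_or |= num
--         bitwise_xor ^= num
--
--     return bitwise_and, bitwise_or, bitwise_xor
-- ===== SOURCE B (Python) =====
-- def bitwise_operations(numbers):
--     if not numbers:
--         return 0, 0, 0
--
--     def go(lo, hi):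
--         # tree-fold over numbers[lo:hi] (nonempty): valid since &, |, ^ are associative
--         if hi - lo == 1:
--             v = numbers[lo]
--             return v, v, v
--         mid = (lo + hi) // 2
--         a1, o1, x1 = go(lo, mid)
--         a2, o2, x2 = go(mid, hi)
--         return a1 & a2, o1 | o2, x1 ^ x2
--
--     return go(0, len(numbers))
-- ===== Notes on version B (the rewrite author's own statement) =====
-- stated objective: alternative
-- what changed: Replaces A's single left-to-right loop threading three accumulators with a recursive divide-and-conquer: the list is split in halves, each half's (AND, OR, XOR) triple is computed recursively and the two triples are combined, which is correct because &, |, ^ are associative.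
import Mathlib
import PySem

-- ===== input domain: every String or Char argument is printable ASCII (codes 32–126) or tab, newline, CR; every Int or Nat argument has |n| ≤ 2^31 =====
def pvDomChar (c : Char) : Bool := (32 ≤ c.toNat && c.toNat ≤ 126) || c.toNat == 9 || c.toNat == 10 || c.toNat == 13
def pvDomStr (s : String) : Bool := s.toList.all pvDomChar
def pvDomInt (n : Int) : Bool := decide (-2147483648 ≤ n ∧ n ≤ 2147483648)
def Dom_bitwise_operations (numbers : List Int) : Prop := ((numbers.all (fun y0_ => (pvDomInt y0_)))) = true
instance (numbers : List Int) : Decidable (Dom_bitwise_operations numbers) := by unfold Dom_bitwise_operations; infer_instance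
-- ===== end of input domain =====

-- B replaces A's single accumulator loop with a divide-and-conquer tree fold (correct since &,|,^ are associative); objective: alternative.
-- ===== PORT A =====
def bitwise_operations (numbers : List Int) : Int × Int × Int :=
  match numbers with
  | [] => (0, 0, 0)
  | x :: rest =>
    let s := rest.foldl (fun (st : Int × Int × Int) num =>
      (Int.land st.1 num, Int.lor st.2.1 num, Int.xor st.2.2 num)) (x, x, x)
    (s.1, s.2.1, s.2.2)

-- ===== PORT B =====
-- go(lo, hi) of Source B, transcribed as recursion on the nonempty sublist itself (split at length/2)
def pvGo (l : List Int) : Int × Int × Int :=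
  if h : l.length ≤ 1 then
    match l with
    | [] => (0, 0, 0)
    | x :: _ => (x, x, x)
  else
    let mid := l.length / 2
    let r1 := pvGo (l.take mid)
    let r2 := pvGo (l.drop mid)
    (Int.land r1.1 r2.1, Int.lor r1.2.1 r2.2.1, Int.xor r1.2.2 r2.2.2)
termination_by l.length
decreasing_by
  · simp only [List.length_take]; omega
  · simp only [List.length_drop]; omega

def bitwise_operations_alt (numbers : List Int) : Int × Int × Int :=
  if numbers = [] then (0, 0, 0) else pvGo numbers

-- ===== PRECONDITION & SPEC =====
def Spec_bitwise_operations (numbers : List Int) (out : Int × Int × Int) : Prop := out = bitwise_operations_alt numbers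
instance (numbers : List Int) (out : Int × Int × Int) : Decidable (Spec_bitwise_operations numbers out) := by unfold Spec_bitwise_operations; infer_instance

-- ===== CLAIM (what is proved, stated in full; the proofs are below) =====
def Claim_equal_bitwise_operations : Prop := ∀ (numbers : List Int), Dom_bitwise_operations numbers → Spec_bitwise_operations numbers (bitwise_operations numbers)

-- ===== LEMMAS AND PROOFS =====
-- "head fold": the value A's loop computes for one operation over a nonempty list
def pvHF (op : Int → Int → Int) : List Int → Int
  | [] => 0
  | x :: r => r.foldl op x

theorem pv_foldl_assoc (op : Int → Int → Int)
    (hassoc : ∀ a b c, op (op a b) c = op a (op b c)) (l : List Int) (a b : Int) :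
    l.foldl op (op a b) = op a (l.foldl op b) := by
  induction l generalizing b with
  | nil => rfl
  | cons h t ih => simp [List.foldl, hassoc, ih]

theorem pvHF_append (op : Int → Int → Int)
    (hassoc : ∀ a b c, op (op a b) c = op a (op b c))
    (l1 l2 : List Int) (h1 : l1 ≠ []) (h2 : l2 ≠ []) :
    pvHF op (l1 ++ l2) = op (pvHF op l1) (pvHF op l2) := by
  cases l1 with
  | nil => exact absurd rfl h1
  | cons x r1 =>
    cases l2 with
    | nil => exact absurd rfl h2
    | cons y r2 =>
      simp only [pvHF, List.cons_append, List.foldl_append, List.foldl]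
      exact pv_foldl_assoc op hassoc r2 _ y

theorem pv_land_assoc (a b c : Int) : Int.land (Int.land a b) c = Int.land a (Int.land b c) := by
  obtain ⟨m⟩|⟨m⟩ := a <;> obtain ⟨n⟩|⟨n⟩ := b <;> obtain ⟨p⟩|⟨p⟩ := c <;>
  · simp only [Int.land]
    congr 1
    apply Nat.eq_of_testBit_eq
    intro k
    simp only [Nat.testBit_and, Nat.testBit_or, Nat.testBit_ldiff]
    cases hm : m.testBit k <;> cases hn : n.testBit k <;> cases hp : p.testBit k <;> simp

theorem pv_lor_assoc (a b c : Int) : Int.lor (Int.lor a b) c = Int.lor a (Int.lor b c) := by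
  obtain ⟨m⟩|⟨m⟩ := a <;> obtain ⟨n⟩|⟨n⟩ := b <;> obtain ⟨p⟩|⟨p⟩ := c <;>
  · simp only [Int.lor]
    congr 1
    apply Nat.eq_of_testBit_eq
    intro k
    simp only [Nat.testBit_and, Nat.testBit_or, Nat.testBit_ldiff]
    cases hm : m.testBit k <;> cases hn : n.testBit k <;> cases hp : p.testBit k <;> simp

theorem pv_xor_assoc (a b c : Int) : Int.xor (Int.xor a b) c = Int.xor a (Int.xor b c) := by
  obtain ⟨m⟩|⟨m⟩ := a <;> obtain ⟨n⟩|⟨n⟩ := b <;> obtain ⟨p⟩|⟨p⟩ := c <;>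
  · simp only [Int.xor]
    congr 1
    apply Nat.eq_of_testBit_eq
    intro k
    simp only [Nat.testBit_xor]
    cases hm : m.testBit k <;> cases hn : n.testBit k <;> cases hp : p.testBit k <;> simp

theorem pvGo_eq_hf (l : List Int) : l ≠ [] →
    pvGo l = (pvHF Int.land l, pvHF Int.lor l, pvHF Int.xor l) := by
  induction l using pvGo.induct with
  | case1 _ _ => intro h; exact absurd rfl h
  | case2 x tail h1 _ =>
    intro _
    cases tail with
    | nil => simp [pvGo, pvHF]
    | cons y t => simp at h1
  | case3 l hle mid ih1 ih2 =>
    intro _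
    have hmid1 : 1 ≤ l.length / 2 := by omega
    have hmidlt : l.length / 2 < l.length := by omega
    have ht : l.take (l.length / 2) ≠ [] := by
      apply List.ne_nil_of_length_pos; simp only [List.length_take]; omega
    have hd : l.drop (l.length / 2) ≠ [] := by
      apply List.ne_nil_of_length_pos; simp only [List.length_drop]; omega
    rw [pvGo]
    simp only [dif_neg hle]
    rw [ih1 ht, ih2 hd]
    have hsplit : l = l.take (l.length / 2) ++ l.drop (l.length / 2) :=
      (List.take_append_drop _ l).symm
    conv_rhs => rw [hsplit]
    rw [pvHF_append Int.land pv_land_assoc _ _ ht hd,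
        pvHF_append Int.lor pv_lor_assoc _ _ ht hd,
        pvHF_append Int.xor pv_xor_assoc _ _ ht hd]

theorem fold_triple (rest : List Int) (a o x : Int) :
    rest.foldl (fun (st : Int × Int × Int) num =>
      (Int.land st.1 num, Int.lor st.2.1 num, Int.xor st.2.2 num)) (a, o, x)
      = (rest.foldl Int.land a, rest.foldl Int.lor o, rest.foldl Int.xor x) := by
  induction rest generalizing a o x with
  | nil => rfl
  | cons h t ih => simpa [List.foldl] using ih _ _ _

-- ===== VERDICT (by name: the statement is the Claim_ definition above) =====
theorem bitwise_operations_spec : Claim_equal_bitwise_operations := by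
  intro numbers _
  unfold Spec_bitwise_operations bitwise_operations bitwise_operations_alt
  cases numbers with
  | nil => rfl
  | cons x rest =>
    simp only [reduceCtorEq, ite_false, fold_triple]
    rw [pvGo_eq_hf (x :: rest) (by simp)]
    simp [pvHF]
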